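-- pv_equiv track=rewrite | github.com/bjbhwcm/JoshWooCrawler | PicCrawler.py | get_urls_with_pic_suffix
-- ===== SOURCE A (Python) =====
-- pic_suffix = [".jpg",".png",".jpeg",".JPG",".JPEG",".PNG",".gif",".GIF",]
--
-- def get_pic_suffix(s):
--     n = len(s) - 1
--     res = ""
--     flag = False
--     for i in range(n + 1):
--         res = res + s[n]
--         if s[n] == ".":
--             flag = True
--             break
--         n = n - 1
--     if flag:
--         suffix = res[::-1]
--         if suffix in pic_suffix:
--             return suffix
--         else:
--             return None
--     else:
--         return None
--
-- def get_urls_with_pic_suffix(url_dict):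
--     pic_urls = []
--     other_urls = []
--     for i in url_dict:
--         suffix = get_pic_suffix(i)
--         if suffix:
--             pic_urls.append(i)
--         else:
--             other_urls.append(i)
--     return pic_urls,other_urls
-- ===== SOURCE B (Python) =====
-- pic_suffix = [".jpg",".png",".jpeg",".JPG",".JPEG",".PNG",".gif",".GIF",]
--
-- def get_urls_with_pic_suffix(url_dict):
--     suffixes = tuple(pic_suffix)
--     pic_urls = [u for u in url_dict if u.endswith(suffixes)]
--     other_urls = [u for u in url_dict if not u.endswith(suffixes)]
--     return pic_urls, other_urls
-- ===== Notes on version B (the rewrite author's own statement) =====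
-- stated objective: simpler
-- what changed: Replaces A's hand-written backward character scan (reversed accumulation up to the last dot, then list membership) by two list comprehensions classifying each url with url.endswith(tuple(pic_suffix)); no helper function remains.
import Mathlib
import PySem

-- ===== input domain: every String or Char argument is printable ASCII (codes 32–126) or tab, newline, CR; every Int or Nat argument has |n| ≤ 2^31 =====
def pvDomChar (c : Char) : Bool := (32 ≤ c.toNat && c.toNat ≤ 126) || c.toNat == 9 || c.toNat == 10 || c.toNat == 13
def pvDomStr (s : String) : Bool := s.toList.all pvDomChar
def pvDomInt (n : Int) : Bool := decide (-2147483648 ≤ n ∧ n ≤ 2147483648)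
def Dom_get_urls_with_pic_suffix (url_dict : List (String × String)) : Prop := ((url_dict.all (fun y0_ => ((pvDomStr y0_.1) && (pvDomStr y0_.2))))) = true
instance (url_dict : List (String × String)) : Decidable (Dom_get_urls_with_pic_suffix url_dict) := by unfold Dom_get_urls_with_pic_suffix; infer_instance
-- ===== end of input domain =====

-- B replaces A's backward dot-scan helper by two list comprehensions testing url.endswith(tuple(pic_suffix)) (objective: simpler).

-- ===== PORT A =====
-- module constant pic_suffix (as lists of code points)
def picSuffix : List (List Char) :=
  [['.','j','p','g'], ['.','p','n','g'], ['.','j','p','e','g'], ['.','J','P','G'],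
   ['.','J','P','E','G'], ['.','P','N','G'], ['.','g','i','f'], ['.','G','I','F']]

-- the 'for i in range(n+1)' loop of get_pic_suffix: fuel = remaining iterations, n = current index.
-- pyGet? = s[n]; the 'none' branch is unreachable (n stays in range while fuel lasts).
def get_pic_suffix_loop (cs : List Char) : Nat → Int → List Char → List Char × Bool
  | 0, _, res => (res, false)
  | fuel + 1, n, res =>
    match PySem.List.pyGet? cs n with
    | none => (res, false)
    | some c =>
      let res := res ++ [c]
      if c = '.' then (res, true)
      else get_pic_suffix_loop cs fuel (n - 1) res

-- get_pic_suffix; res[::-1] is slice?, step -1 ≠ 0 so it is always 'some' (getD [] is unreachable)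
def get_pic_suffix (s : String) : Option String :=
  let cs := s.toList
  let r := get_pic_suffix_loop cs cs.length ((cs.length : Int) - 1) []
  if r.2 then
    let suffix := (PySem.List.slice? r.1 none none (-1)).getD []
    if suffix ∈ picSuffix then some (String.ofList suffix) else none
  else none

-- 'for i in url_dict' iterates the dict's keys; 'if suffix:' — a returned suffix always
-- contains '.', hence is nonempty, so truthiness = isSome.
def get_urls_with_pic_suffix (url_dict : List (String × String)) : List String × List String :=
  url_dict.foldl (fun acc kv =>
    match get_pic_suffix kv.1 with
    | some _ => (acc.1 ++ [kv.1], acc.2)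
    | none => (acc.1, acc.2 ++ [kv.1])) ([], [])

-- ===== PORT B =====
def isPicUrl (u : String) : Bool := picSuffix.any (fun p => PySem.Chars.endswith u.toList p)

def get_urls_with_pic_suffix_alt (url_dict : List (String × String)) : List String × List String :=
  ((url_dict.map Prod.fst).filter (fun u => isPicUrl u),
   (url_dict.map Prod.fst).filter (fun u => ! isPicUrl u))

-- ===== PRECONDITION & SPEC =====
def Spec_get_urls_with_pic_suffix (url_dict : List (String × String)) (out : List String × List String) : Prop := out = get_urls_with_pic_suffix_alt url_dict
instance (url_dict : List (String × String)) (out : List String × List String) : Decidable (Spec_get_urls_with_pic_suffix url_dict out) := by unfold Spec_get_urls_with_pic_suffix; infer_instance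

-- ===== CLAIM (what is proved, stated in full; the proofs are below) =====
def Claim_equal_get_urls_with_pic_suffix : Prop := ∀ (url_dict : List (String × String)), Dom_get_urls_with_pic_suffix url_dict → Spec_get_urls_with_pic_suffix url_dict (get_urls_with_pic_suffix url_dict)

-- ===== LEMMAS AND PROOFS =====

-- spec-side rendering of the scan loop: walk the reversed string, accumulate until the first '.'
def bscan : List Char → List Char → List Char × Bool
  | [], res => (res, false)
  | c :: rest, res => if c = '.' then (res ++ [c], true) else bscan rest (res ++ [c])

lemma loop_eq_bscan (cs : List Char) :
    ∀ (k : Nat) (res : List Char), k < cs.length →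
    get_pic_suffix_loop cs (k + 1) (k : Int) res = bscan ((cs.take (k + 1)).reverse) res := by
  intro k
  induction k with
  | zero =>
    intro res hk
    simp [get_pic_suffix_loop, PySem.List.pyGet?, PySem.List.pyIdx?, hk,
      List.take_add_one, bscan]
  | succ k ih =>
    intro res hk
    have hk' : k < cs.length := Nat.lt_of_succ_lt hk
    have hget : PySem.List.pyGet? cs ((k : Int) + 1) = some cs[k + 1] := by
      simp only [PySem.List.pyGet?, PySem.List.pyIdx?]
      rw [if_pos (by omega), if_pos (by exact_mod_cast hk)]
      simp [List.getElem?_eq_getElem hk]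
    have htake : (cs.take (k + 1 + 1)).reverse = cs[k + 1] :: (cs.take (k + 1)).reverse := by
      simp [List.take_add_one, List.getElem?_eq_getElem hk]
    rw [htake]
    show get_pic_suffix_loop cs (k + 1 + 1) ((k + 1 : Nat) : Int) res = _
    rw [get_pic_suffix_loop]
    push_cast
    rw [hget]
    simp only [bscan]
    split_ifs with hdot
    · rfl
    · have : (k : Int) + 1 - 1 = (k : Int) := by ring
      rw [this, ih _ hk']

lemma bscan_spec (rs : List Char) : ∀ res,
    bscan rs res =
      if '.' ∈ rs then (res ++ rs.takeWhile (· ≠ '.') ++ ['.'], true)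
      else (res ++ rs, false) := by
  induction rs with
  | nil => intro res; simp [bscan]
  | cons c rest ih =>
    intro res
    by_cases hc : c = '.'
    · subst hc; simp [bscan]
    · rw [bscan, if_neg hc, ih]
      simp [List.mem_cons, hc, Ne.symm hc]

lemma takeWhile_append_dot (l1 l2 : List Char) (h : ∀ c ∈ l1, c ≠ '.') :
    (l1 ++ '.' :: l2).takeWhile (· ≠ '.') = l1 := by
  induction l1 with
  | nil => simp
  | cons a t ih =>
    have ha : a ≠ '.' := h a (by simp)
    simp only [List.cons_append, List.takeWhile_cons, decide_eq_true_eq]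
    rw [if_pos ha, ih (fun c hc => h c (by simp [hc]))]

-- a list containing '.' splits at its first '.'
lemma dot_decomp (l : List Char) (h : '.' ∈ l) :
    l = l.takeWhile (· ≠ '.') ++ '.' :: (l.dropWhile (· ≠ '.')).tail := by
  induction l with
  | nil => cases h
  | cons c t ih =>
    by_cases hc : c = '.'
    · subst hc; simp
    · have ht : '.' ∈ t := (List.mem_cons.mp h).resolve_left (fun h' => hc h'.symm)
      simp only [List.takeWhile_cons, List.dropWhile_cons]
      rw [if_pos (by simp [hc]), if_pos (by simp [hc]), List.cons_append]
      exact congrArg (c :: ·) (ih ht)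

-- every listed suffix is '.' followed by dot-free characters
set_option maxRecDepth 4096 in
lemma picSuffix_shape (p : List Char) (hp : p ∈ picSuffix) :
    ∃ body, p = '.' :: body ∧ ∀ c ∈ body, c ≠ '.' := by
  simp only [picSuffix, List.mem_cons, List.not_mem_nil, or_false] at hp
  rcases hp with rfl | rfl | rfl | rfl | rfl | rfl | rfl | rfl <;> refine ⟨_, rfl, ?_⟩ <;> simp

-- characterisation of A's helper on an arbitrary string: the last-dot suffix test equals endswith-any
lemma get_pic_suffix_isSome (s : String) :
    (get_pic_suffix s).isSome = isPicUrl s := by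
  simp only [get_pic_suffix, isPicUrl]
  generalize s.toList = cs
  rcases Nat.eq_zero_or_pos cs.length with h0 | hpos
  · have hnil : cs = [] := List.eq_nil_of_length_eq_zero h0
    subst hnil
    simp only [List.length_nil, get_pic_suffix_loop, if_neg, Bool.false_eq_true,
      not_false_eq_true, Option.isSome_none]
    symm
    rw [List.any_eq_false]
    intro p hp
    obtain ⟨body, rfl, -⟩ := picSuffix_shape p hp
    rw [PySem.Chars.endswith_iff]
    rintro ⟨pre, hpre⟩
    simpa using congrArg List.length hpre
  · obtain ⟨k, hk⟩ : ∃ k, cs.length = k + 1 := ⟨cs.length - 1, (Nat.succ_pred_eq_of_pos hpos).symm⟩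
    have hklt : k < cs.length := by omega
    rw [hk, show (((k + 1 : Nat) : Int) - 1) = (k : Int) by push_cast; ring,
      loop_eq_bscan cs k [] hklt]
    have htake : cs.take (k + 1) = cs := by rw [← hk]; exact List.take_length
    rw [htake, bscan_spec]
    by_cases hdot : '.' ∈ cs.reverse
    · rw [if_pos hdot]
      simp only [List.nil_append, reduceIte]
      have hsuf : (PySem.List.slice? (cs.reverse.takeWhile (· ≠ '.') ++ ['.']) none none (-1)).getD []
          = '.' :: (cs.reverse.takeWhile (· ≠ '.')).reverse := by
        rw [PySem.List.slice?_none_none_neg_one]; simp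
      rw [hsuf]
      set tw := cs.reverse.takeWhile (· ≠ '.') with htw
      have hdecomp : cs.reverse = tw ++ '.' :: (cs.reverse.dropWhile (· ≠ '.')).tail :=
        dot_decomp cs.reverse hdot
      by_cases hmem : '.' :: tw.reverse ∈ picSuffix
      · rw [if_pos hmem, Option.isSome_some]
        symm
        rw [List.any_eq_true]
        refine ⟨'.' :: tw.reverse, hmem, ?_⟩
        rw [PySem.Chars.endswith_iff]
        refine ⟨(cs.reverse.dropWhile (· ≠ '.')).tail.reverse, ?_⟩
        have := congrArg List.reverse hdecomp
        simpa using this.symm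
      · rw [if_neg hmem, Option.isSome_none]
        symm
        simp only [List.any_eq_false]
        intro p hp
        obtain ⟨body, rfl, hbody⟩ := picSuffix_shape p hp
        rw [PySem.Chars.endswith_iff]
        rintro ⟨pre, hpre⟩
        have hrev : cs.reverse = body.reverse ++ '.' :: pre.reverse := by
          rw [← hpre]; simp
        have htw' : tw = body.reverse := by
          rw [htw, hrev, takeWhile_append_dot]
          intro c hc; exact hbody c (by simpa using hc)
        apply hmem
        rw [htw']
        simpa using hp
    · rw [if_neg hdot]
      simp only [List.nil_append, Bool.false_eq_true, if_false, Option.isSome_none]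
      symm
      simp only [List.any_eq_false]
      intro p hp
      obtain ⟨body, rfl, hbody⟩ := picSuffix_shape p hp
      rw [PySem.Chars.endswith_iff]
      rintro ⟨pre, hpre⟩
      apply hdot
      rw [← hpre]
      simp

-- A's accumulator loop computes the two filters of B, whatever the accumulators started as
lemma foldl_eq_filters (l : List (String × String)) : ∀ (a1 a2 : List String),
    l.foldl (fun acc kv =>
      match get_pic_suffix kv.1 with
      | some _ => (acc.1 ++ [kv.1], acc.2)
      | none => (acc.1, acc.2 ++ [kv.1])) (a1, a2)
    = (a1 ++ (l.map Prod.fst).filter (fun u => isPicUrl u),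
       a2 ++ (l.map Prod.fst).filter (fun u => ! isPicUrl u)) := by
  induction l with
  | nil => intro a1 a2; simp
  | cons kv rest ih =>
    intro a1 a2
    have hkey := get_pic_suffix_isSome kv.1
    simp only [List.foldl_cons, List.map_cons, List.filter_cons]
    cases hopt : get_pic_suffix kv.1 with
    | some v =>
      have hpic : isPicUrl kv.1 = true := by rw [← hkey, hopt]; rfl
      simp [hpic, ih]
    | none =>
      have hpic : isPicUrl kv.1 = false := by rw [← hkey, hopt]; rfl
      simp [hpic, ih]

-- ===== VERDICT (by name: the statement is the Claim_ definition above) =====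
theorem get_urls_with_pic_suffix_spec : Claim_equal_get_urls_with_pic_suffix := by
  intro url_dict _
  show get_urls_with_pic_suffix url_dict = get_urls_with_pic_suffix_alt url_dict
  unfold get_urls_with_pic_suffix get_urls_with_pic_suffix_alt
  rw [foldl_eq_filters]
  simp
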